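-- pv_equiv track=rewrite | github.com/wmaciel/onewheel-video-hud | src/IconManager.py | compute_battery_icon_path
-- ===== SOURCE A (Python) =====
-- def compute_battery_icon_path(charge):
--     tier_paths = {
--         999: '../data/battery.png',
--         100: '../data/battery_100.png',
--         90: '../data/battery_90.png',
--         80: '../data/battery_80.png',
--         60: '../data/battery_60.png',
--         50: '../data/battery_50.png',
--         30: '../data/battery_30.png',
--         20: '../data/battery_20.png',
--         -999: '../data/battery.png'
--     }
--     prev_t = 999
--     for t in sorted(tier_paths.keys(), reverse=True):
--         if charge > t:
--             return tier_paths[prev_t]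
--         else:
--             prev_t = t
-- ===== SOURCE B (Python) =====
-- def compute_battery_icon_path(charge):
--     # Binary search for the smallest tier >= charge in an ascending table,
--     # then build the path from the indexed name. None below the bottom tier.
--     if charge <= -999:
--         return None
--     tiers = [20, 30, 50, 60, 80, 90, 100]
--     names = ['battery_20', 'battery_30', 'battery_50', 'battery_60',
--              'battery_80', 'battery_90', 'battery_100', 'battery']
--     lo, hi = 0, len(tiers)
--     while lo < hi:
--         mid = (lo + hi) // 2
--         if tiers[mid] < charge:
--             lo = mid + 1
--         else:
--             hi = mid
--     return '../data/%s.png' % names[lo]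
-- ===== Notes on version B (the rewrite author's own statement) =====
-- stated objective: alternative
-- what changed: Replaces the dict + reverse-sorted descending linear scan with prev_t bookkeeping by a binary search over an ascending threshold table that indexes into a name list and formats the path.
import Mathlib
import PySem

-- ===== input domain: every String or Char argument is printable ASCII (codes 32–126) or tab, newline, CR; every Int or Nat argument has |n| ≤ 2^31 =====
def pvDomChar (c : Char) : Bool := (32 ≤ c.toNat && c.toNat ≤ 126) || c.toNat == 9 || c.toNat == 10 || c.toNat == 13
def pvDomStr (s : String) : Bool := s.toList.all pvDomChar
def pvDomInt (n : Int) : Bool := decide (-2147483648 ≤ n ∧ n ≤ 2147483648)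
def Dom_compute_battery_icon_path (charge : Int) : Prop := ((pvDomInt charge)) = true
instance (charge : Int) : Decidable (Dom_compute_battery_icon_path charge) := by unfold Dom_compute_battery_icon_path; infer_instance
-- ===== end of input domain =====

-- B replaces A's dict + reverse-sorted descending scan with prev_t bookkeeping by a
-- binary search over an ascending threshold table with an indexed name list (alternative).

-- ===== PORT A =====
def pvTierPaths : PySem.Dict Int String := PySem.Dict.ofList
  [(999, "../data/battery.png"), (100, "../data/battery_100.png"),
   (90, "../data/battery_90.png"), (80, "../data/battery_80.png"),
   (60, "../data/battery_60.png"), (50, "../data/battery_50.png"),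
   (30, "../data/battery_30.png"), (20, "../data/battery_20.png"),
   (-999, "../data/battery.png")]

-- the for-loop with early return and prev_t accumulator
def pvLoopA (charge : Int) : Int → List Int → Option String
  | _, [] => none
  | prev, t :: ts =>
    if charge > t then pvTierPaths.get? prev else pvLoopA charge t ts

def compute_battery_icon_path (charge : Int) : Option String :=
  pvLoopA charge 999 (PySem.List.sorted pvTierPaths.keys (fun x => x) true)

-- ===== PORT B =====
def pvTiersB : List Int := [20, 30, 50, 60, 80, 90, 100]
def pvNamesB : List String :=
  ["battery_20", "battery_30", "battery_50", "battery_60",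
   "battery_80", "battery_90", "battery_100", "battery"]

-- the while-loop of Source B; tiers[mid] is always in range, getD is exact here
def pvBsearch (charge : Int) (lo hi : Nat) : Nat :=
  if h : lo < hi then
    let mid := (lo + hi) / 2  -- (lo+hi)//2 on nonneg Nats: Lean / = Python // here
    if pvTiersB.getD mid 0 < charge then pvBsearch charge (mid + 1) hi
    else pvBsearch charge lo mid
  else lo
termination_by hi - lo
decreasing_by all_goals omega

def compute_battery_icon_path_alt (charge : Int) : Option String :=
  if charge ≤ -999 then none
  else
    let lo := pvBsearch charge 0 pvTiersB.length
    some ("../data/" ++ pvNamesB.getD lo "" ++ ".png")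

-- ===== PRECONDITION & SPEC =====
def Spec_compute_battery_icon_path (charge : Int) (out : Option String) : Prop := out = compute_battery_icon_path_alt charge
instance (charge : Int) (out : Option String) : Decidable (Spec_compute_battery_icon_path charge out) := by unfold Spec_compute_battery_icon_path; infer_instance

-- ===== CLAIM (what is proved, stated in full; the proofs are below) =====
def Claim_equal_compute_battery_icon_path : Prop := ∀ (charge : Int), Dom_compute_battery_icon_path charge → Spec_compute_battery_icon_path charge (compute_battery_icon_path charge)

-- ===== LEMMAS AND PROOFS =====
theorem pvSortedKeys :
    PySem.List.sorted pvTierPaths.keys (fun x => x) true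
      = [999, 100, 90, 80, 60, 50, 30, 20, -999] := by decide

theorem pvBsearch_val (charge : Int) :
    pvBsearch charge 0 7 =
      if charge ≤ 20 then 0 else if charge ≤ 30 then 1 else if charge ≤ 50 then 2
      else if charge ≤ 60 then 3 else if charge ≤ 80 then 4 else if charge ≤ 90 then 5
      else if charge ≤ 100 then 6 else 7 := by
  by_cases h0 : charge ≤ 20
  · simp [pvBsearch, pvTiersB, show ¬((60 : Int) < charge) from by omega, show ¬((30 : Int) < charge) from by omega, show ¬((20 : Int) < charge) from by omega, h0]
  by_cases h1 : charge ≤ 30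
  · simp [pvBsearch, pvTiersB, show ¬((60 : Int) < charge) from by omega, show ¬((30 : Int) < charge) from by omega, show ((20 : Int) < charge) from by omega, h0, h1]
  by_cases h2 : charge ≤ 50
  · simp [pvBsearch, pvTiersB, show ¬((60 : Int) < charge) from by omega, show ((30 : Int) < charge) from by omega, show ¬((50 : Int) < charge) from by omega, h0, h1, h2]
  by_cases h3 : charge ≤ 60
  · simp [pvBsearch, pvTiersB, show ¬((60 : Int) < charge) from by omega, show ((30 : Int) < charge) from by omega, show ((50 : Int) < charge) from by omega, h0, h1, h2, h3]
  by_cases h4 : charge ≤ 80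
  · simp [pvBsearch, pvTiersB, show ((60 : Int) < charge) from by omega, show ¬((90 : Int) < charge) from by omega, show ¬((80 : Int) < charge) from by omega, h0, h1, h2, h3, h4]
  by_cases h5 : charge ≤ 90
  · simp [pvBsearch, pvTiersB, show ((60 : Int) < charge) from by omega, show ¬((90 : Int) < charge) from by omega, show ((80 : Int) < charge) from by omega, h0, h1, h2, h3, h4, h5]
  by_cases h6 : charge ≤ 100
  · simp [pvBsearch, pvTiersB, show ((60 : Int) < charge) from by omega, show ((90 : Int) < charge) from by omega, show ¬((100 : Int) < charge) from by omega, h0, h1, h2, h3, h4, h5, h6]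
  · simp [pvBsearch, pvTiersB, show ((60 : Int) < charge) from by omega, show ((90 : Int) < charge) from by omega, show ((100 : Int) < charge) from by omega, h0, h1, h2, h3, h4, h5, h6]

-- ===== VERDICT (by name: the statement is the Claim_ definition above) =====
set_option maxHeartbeats 1000000 in
theorem compute_battery_icon_path_spec : Claim_equal_compute_battery_icon_path := by
  intro charge _
  unfold Spec_compute_battery_icon_path compute_battery_icon_path
  rw [pvSortedKeys]
  simp only [pvLoopA, compute_battery_icon_path_alt]
  rw [show pvTiersB.length = 7 from rfl, pvBsearch_val]
  simp only [pvTierPaths, PySem.Dict.ofList, pvNamesB]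
  split_ifs <;> first | rfl | omega
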